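-- pv_equiv track=rewrite | github.com/BlackRoad-OS-Inc/blackroad-os-core | seed_full_cipher_partition.py | integer_partition
-- ===== SOURCE A (Python) =====
-- def integer_partition(number, num_parts=None, max_parts=22000):
--     """
--     Step 4: PARTITION the number into smaller numbers
--
--     This is the KEY insight! One seed → 22,000 partitions → 22,000 addresses!
--
--     Example: partition(10, 3) could be:
--       [1, 1, 8]
--       [1, 2, 7]
--       [1, 3, 6]
--       [2, 2, 6]
--       [2, 3, 5]
--       [3, 3, 4]
--       ...
--
--     If num_parts=22000, you get 22,000 different combinations!
--     Each partition → hash → unique address!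
--     """
--     if num_parts is None:
--         # Generate limited partitions
--         num_parts = min(10, max_parts)  # Start small for demo
--
--     partitions = []
--
--     # Simple partition: divide into equal-ish parts
--     base_val = number // num_parts
--     remainder = number % num_parts
--
--     for i in range(num_parts):
--         partition = [base_val] * num_parts
--         # Add remainder distributed across first N elements
--         for j in range(remainder):
--             partition[j] += 1
--
--         # Create variations by shifting
--         shifted = partition[i:] + partition[:i]
--         partition_str = ''.join(str(x) for x in shifted)
--         partitions.append(partition_str)
--
--     return partitions[:max_parts]
-- ===== SOURCE B (Python) =====
-- def integer_partition(number, num_parts=None, max_parts=22000):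
--     if num_parts is None:
--         num_parts = min(10, max_parts)
--     base_val = number // num_parts
--     remainder = number % num_parts
--     # build the piece table once: remainder goes to the first elements
--     pieces = [str(base_val + 1)] * remainder + [str(base_val)] * (num_parts - remainder)
--     big = ''.join(pieces)
--     doubled = big + big
--     total = len(big)
--     result = []
--     offset = 0
--     for piece in pieces:
--         result.append(doubled[offset:offset + total])
--         offset += len(piece)
--     return result[:max_parts]
-- ===== Notes on version B (the rewrite author's own statement) =====
-- stated objective: alternative
-- what changed: B builds the string-piece table and the joined text once, then produces each rotation as a character-offset slice of the doubled text while walking the pieces with a running offset, instead of A's per-iteration rebuild of the int partition, per-index list rotation and per-string join.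
import Mathlib
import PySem

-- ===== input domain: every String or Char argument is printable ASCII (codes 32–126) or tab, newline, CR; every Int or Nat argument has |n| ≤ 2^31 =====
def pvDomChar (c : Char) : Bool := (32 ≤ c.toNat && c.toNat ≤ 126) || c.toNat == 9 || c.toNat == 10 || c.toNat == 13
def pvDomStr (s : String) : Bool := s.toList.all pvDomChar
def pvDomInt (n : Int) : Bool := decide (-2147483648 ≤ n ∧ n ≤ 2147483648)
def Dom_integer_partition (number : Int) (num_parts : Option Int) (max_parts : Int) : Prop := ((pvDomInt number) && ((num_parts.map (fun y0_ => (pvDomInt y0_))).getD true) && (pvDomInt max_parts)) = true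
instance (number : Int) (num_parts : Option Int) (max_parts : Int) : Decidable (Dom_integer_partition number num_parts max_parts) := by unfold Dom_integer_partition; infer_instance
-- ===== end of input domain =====

-- B builds the piece table and joined text once and slices each rotation out of the doubled
-- text at a running character offset, instead of A's per-iteration rebuild/rotate/join. (alternative)

-- ===== PORT A =====
def integer_partition (number : Int) (num_parts : Option Int) (max_parts : Int) : List String :=
  let n : Int := match num_parts with | none => min 10 max_parts | some k => k
  let base_val : Int := PySem.Int.floordiv number n
  let remainder : Int := PySem.Int.mod number n
  let partitions : List String :=
    (PySem.List.pyRange 0 n 1).foldl (fun acc i =>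
      let partition : List Int := List.replicate n.toNat base_val
      let partition : List Int :=
        (PySem.List.pyRange 0 remainder 1).foldl
          (fun p j => p.set j.toNat (PySem.List.pyGetD p j 0 + 1)) partition
      let shifted : List Int :=
        PySem.List.slice partition (some i) none ++ PySem.List.slice partition none (some i)
      let partition_str : String := PySem.Str.join "" (shifted.map PySem.Int.toStr)
      acc ++ [partition_str]) []
  PySem.List.slice partitions none (some max_parts)

-- ===== PORT B =====
def integer_partition_alt (number : Int) (num_parts : Option Int) (max_parts : Int) : List String :=
  let n : Int := match num_parts with | none => min 10 max_parts | some k => k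
  let base_val : Int := PySem.Int.floordiv number n
  let remainder : Int := PySem.Int.mod number n
  let pieces : List (List Char) :=
    List.replicate remainder.toNat (PySem.Int.toChars (base_val + 1)) ++
    List.replicate (n - remainder).toNat (PySem.Int.toChars base_val)
  let big : List Char := PySem.Chars.join [] pieces
  let doubled : List Char := big ++ big
  let total : Int := (big.length : Int)
  let result : List String :=
    (pieces.foldl (fun (st : List String × Int) piece =>
        (st.1 ++ [String.ofList (PySem.List.slice doubled (some st.2) (some (st.2 + total)))],
         st.2 + (piece.length : Int))) ([], 0)).1
  PySem.List.slice result none (some max_parts)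

-- ===== PRECONDITION & SPEC =====
-- Pre_ excludes exactly the inputs where the effective num_parts is 0: there A raises ZeroDivisionError.
def Pre_integer_partition (number : Int) (num_parts : Option Int) (max_parts : Int) : Prop :=
  (match num_parts with | none => min 10 max_parts | some k => k) ≠ 0
instance (number : Int) (num_parts : Option Int) (max_parts : Int) : Decidable (Pre_integer_partition number num_parts max_parts) := by unfold Pre_integer_partition; infer_instance
def pvWitness_integer_partition : Int × Option Int × Int := (10, some 3, 22000)
def Spec_integer_partition (number : Int) (num_parts : Option Int) (max_parts : Int) (out : List String) : Prop := out = integer_partition_alt number num_parts max_parts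
instance (number : Int) (num_parts : Option Int) (max_parts : Int) (out : List String) : Decidable (Spec_integer_partition number num_parts max_parts out) := by unfold Spec_integer_partition; infer_instance

-- ===== CLAIM (what is proved, stated in full; the proofs are below) =====
def Claim_equal_integer_partition : Prop := ∀ (number : Int) (num_parts : Option Int) (max_parts : Int), Dom_integer_partition number num_parts max_parts → Pre_integer_partition number num_parts max_parts → Spec_integer_partition number num_parts max_parts (integer_partition number num_parts max_parts)


-- ===== LEMMAS AND PROOFS =====

-- joining char-lists with the empty separator is flatten
theorem pvJoinEmpty (ps : List (List Char)) : PySem.Chars.join [] ps = ps.flatten := by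
  induction ps with
  | nil => simp [PySem.Chars.join_nil]
  | cons p t ih =>
    cases t with
    | nil => simp [PySem.Chars.join_singleton]
    | cons q u => rw [PySem.Chars.join_cons_cons]; simp_all

-- A's inner increment loop turns the replicate into the two-block list
theorem pvIncrLoop (b : Int) (N : Nat) : ∀ (R : Nat), R ≤ N →
    (PySem.List.pyRange 0 (R : Int) 1).foldl
      (fun p j => p.set j.toNat (PySem.List.pyGetD p j 0 + 1)) (List.replicate N b)
    = List.replicate R (b+1) ++ List.replicate (N-R) b := by
  intro R
  induction R with
  | zero => intro _; simp [PySem.List.pyRange_one_eq_nil]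
  | succ R ih =>
    intro h
    have hle : R ≤ N := Nat.le_of_succ_le h
    have hlt : R < N := h
    rw [show ((R+1 : Nat) : Int) = (R : Int) + 1 by push_cast; ring]
    rw [PySem.List.pyRange_one_succ_right (by positivity)]
    rw [List.foldl_append, ih hle]
    simp only [List.foldl_cons, List.foldl_nil]
    have hNR : N - R = (N - (R+1)) + 1 := by omega
    rw [hNR, List.replicate_succ]
    simp only [PySem.List.pyGetD_natCast, Int.toNat_natCast]
    rw [List.getD_append_right _ _ _ _ (by simp), List.set_append_right _ _ (by simp)]
    simp [List.replicate_succ']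

-- B's offset-walking loop produces the prefix-sum-indexed slices
theorem pvBFold (doubled : List Char) (total : Int) :
    ∀ (ps : List (List Char)) (acc : List String) (m : Nat),
    (ps.foldl (fun (st : List String × Int) piece =>
        (st.1 ++ [String.ofList (PySem.List.slice doubled (some st.2) (some (st.2 + total)))],
         st.2 + (piece.length : Int))) (acc, (m : Int))).1
    = acc ++ (List.range ps.length).map (fun k =>
        String.ofList (PySem.List.slice doubled
          (some ((m + ((ps.take k).map List.length).sum : Nat) : Int))
          (some (((m + ((ps.take k).map List.length).sum : Nat) : Int) + total)))) := by
  intro ps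
  induction ps with
  | nil => intro acc m; simp
  | cons p t ih =>
    intro acc m
    rw [List.foldl_cons]
    have hcast : (m : Int) + (p.length : Int) = ((m + p.length : Nat) : Int) := by push_cast; ring
    simp only [hcast]
    rw [ih]
    simp only [List.length_cons, List.range_succ_eq_map, List.map_cons, List.map_map,
      List.take_zero, List.map_nil, List.sum_nil, Nat.add_zero]
    rw [List.append_assoc, List.singleton_append]
    congr 1
    congr 1
    apply List.map_congr_left
    intro k _
    simp [List.take_succ_cons, Nat.add_assoc]

-- rotating the pieces is slicing the doubled flattened text
theorem pvRot (PS : List (List Char)) (k : Nat) :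
    List.take PS.flatten.length
      (List.drop (((PS.take k).map List.length).sum) (PS.flatten ++ PS.flatten))
    = (PS.drop k).flatten ++ (PS.take k).flatten := by
  have hT : ((PS.take k).map List.length).sum = (PS.take k).flatten.length :=
    List.length_flatten.symm
  have hPS : PS.flatten = (PS.take k).flatten ++ (PS.drop k).flatten := by
    rw [← List.flatten_append, List.take_append_drop]
  rw [hT, hPS]
  rw [show ((PS.take k).flatten ++ (PS.drop k).flatten) ++ ((PS.take k).flatten ++ (PS.drop k).flatten)
      = (PS.take k).flatten ++ ((PS.drop k).flatten ++ ((PS.take k).flatten ++ (PS.drop k).flatten))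
      from by simp [List.append_assoc]]
  rw [List.drop_left]
  rw [show ((PS.take k).flatten ++ (PS.drop k).flatten).length
      = (PS.drop k).flatten.length + (PS.take k).flatten.length
      from by rw [List.length_append, Nat.add_comm]]
  rw [List.take_length_add_append, List.take_left]

-- B's loop with the concrete empty start state
theorem pvBFold0 (doubled : List Char) (total : Int) (ps : List (List Char)) :
    (ps.foldl (fun (st : List String × Int) piece =>
        (st.1 ++ [String.ofList (PySem.List.slice doubled (some st.2) (some (st.2 + total)))],
         st.2 + (piece.length : Int))) ([], (0 : Int))).1
    = (List.range ps.length).map (fun k =>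
        String.ofList (PySem.List.slice doubled
          (some ((((ps.take k).map List.length).sum : Nat) : Int))
          (some (((((ps.take k).map List.length).sum : Nat) : Int) + total)))) := by
  have h := pvBFold doubled total ps [] 0
  simpa using h

-- the main equality for an explicit non-zero num_parts
theorem pvMain (number n max_parts : Int) (hn : n ≠ 0) :
    integer_partition number (some n) max_parts = integer_partition_alt number (some n) max_parts := by
  rcases lt_or_gt_of_ne hn with hneg | hpos
  · -- n < 0 : both sides are []
    obtain ⟨h1, h2⟩ := PySem.Int.mod_neg_bounds number hneg
    simp only [integer_partition, integer_partition_alt]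
    rw [PySem.List.pyRange_one_eq_nil (le_of_lt hneg)]
    rw [show (PySem.Int.mod number n).toNat = 0 from Int.toNat_of_nonpos h2]
    rw [show (n - PySem.Int.mod number n).toNat = 0 from Int.toNat_of_nonpos (by omega)]
    simp [PySem.List.slice]
  · -- n > 0
    have hn0 : 0 ≤ n := le_of_lt hpos
    have hr0 : 0 ≤ PySem.Int.mod number n := PySem.Int.mod_nonneg number hpos
    have hrn : PySem.Int.mod number n < n := PySem.Int.mod_lt number hpos
    simp only [integer_partition, integer_partition_alt]
    set b := PySem.Int.floordiv number n with hbdef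
    set r := PySem.Int.mod number n with hrdef
    obtain ⟨N, hN⟩ : ∃ N : Nat, (N : Int) = n := ⟨n.toNat, Int.toNat_of_nonneg hn0⟩
    obtain ⟨R, hR⟩ : ∃ R : Nat, (R : Int) = r := ⟨r.toNat, Int.toNat_of_nonneg hr0⟩
    have hRN : R ≤ N := by omega
    rw [← hN, ← hR]
    simp only [Int.toNat_natCast]
    rw [show ((N : Int) - (R : Int)).toNat = N - R from by omega]
    rw [PySem.List.foldl_append_singleton_eq_map, List.nil_append]
    simp only [pvIncrLoop b N R hRN]
    rw [PySem.List.pyRange_zero_natCast, List.map_map]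
    rw [pvJoinEmpty, pvBFold0]
    rw [show List.replicate R (PySem.Int.toChars (b+1)) ++ List.replicate (N-R) (PySem.Int.toChars b)
        = (List.replicate R (b+1) ++ List.replicate (N-R) b).map PySem.Int.toChars
        from by simp [List.map_replicate]]
    set part : List Int := List.replicate R (b+1) ++ List.replicate (N-R) b with hpart
    rw [show (part.map PySem.Int.toChars).length = N
        from by simp [hpart, List.length_replicate]; omega]
    congr 1
    apply List.map_congr_left
    intro k hk
    simp only [Function.comp_apply]
    rw [PySem.List.slice_from_natCast, PySem.List.slice_to_natCast]
    rw [PySem.List.slice_natCast_add, pvRot (part.map PySem.Int.toChars) k]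
    rw [← String.ofList_toList (s := PySem.Str.join "" _)]
    rw [PySem.Str.toList_join]
    rw [show ("" : String).toList = ([] : List Char) from rfl, List.map_map]
    rw [show (String.toList ∘ PySem.Int.toStr) = PySem.Int.toChars from funext PySem.Int.toList_toStr]
    rw [pvJoinEmpty]
    rw [List.map_append, List.flatten_append, ← List.map_drop, ← List.map_take]

-- ===== VERDICT (by name: the statement is the Claim_ definition above) =====
theorem integer_partition_spec : Claim_equal_integer_partition := by
  intro number num_parts max_parts _ hpre
  unfold Spec_integer_partition
  cases num_parts with
  | none =>
    have h : (min 10 max_parts : Int) ≠ 0 := hpre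
    exact pvMain number (min 10 max_parts) max_parts h
  | some k =>
    exact pvMain number k max_parts hpre
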